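-- pv_equiv track=rewrite | github.com/JudyDukmak/Intelligent-Transportation-System | preprocessing/parser.py | transform_state
-- ===== SOURCE A (Python) =====
-- from collections import Counter
--
-- def transform_state(
--     raw_lane_counts: dict[str, int],
--     lane_map: dict[str, str],
-- ) -> dict[str, int]:
--     """Aggregate per-lane counts into totals per movement type (e.g. go_straight, turn_left)."""
--     agg: Counter[str] = Counter()
--     for lane_id, count in raw_lane_counts.items():
--         m = lane_map.get(lane_id)
--         if m is not None:
--             agg[m] += count
--     return dict(agg)
-- ===== SOURCE B (Python) =====
-- def transform_state(
--     raw_lane_counts: dict[str, int],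
--     lane_map: dict[str, str],
-- ) -> dict[str, int]:
--     """Aggregate per-lane counts into totals per movement type (two-pass:
--     first determine movement order, then compute each movement's sum)."""
--     movements: list[str] = []
--     for lane_id in raw_lane_counts:
--         m = lane_map.get(lane_id)
--         if m is not None and m not in movements:
--             movements.append(m)
--     return {
--         m: sum(c for l, c in raw_lane_counts.items() if lane_map.get(l) == m)
--         for m in movements
--     }
-- ===== Notes on version B (the rewrite author's own statement) =====
-- stated objective: alternative
-- what changed: Replaces A's single streaming Counter accumulation with a two-pass index-then-reduce: first collect the movement keys in first-occurrence order, then compute each movement's total by a separate sum over the lane counts.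
import Mathlib
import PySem

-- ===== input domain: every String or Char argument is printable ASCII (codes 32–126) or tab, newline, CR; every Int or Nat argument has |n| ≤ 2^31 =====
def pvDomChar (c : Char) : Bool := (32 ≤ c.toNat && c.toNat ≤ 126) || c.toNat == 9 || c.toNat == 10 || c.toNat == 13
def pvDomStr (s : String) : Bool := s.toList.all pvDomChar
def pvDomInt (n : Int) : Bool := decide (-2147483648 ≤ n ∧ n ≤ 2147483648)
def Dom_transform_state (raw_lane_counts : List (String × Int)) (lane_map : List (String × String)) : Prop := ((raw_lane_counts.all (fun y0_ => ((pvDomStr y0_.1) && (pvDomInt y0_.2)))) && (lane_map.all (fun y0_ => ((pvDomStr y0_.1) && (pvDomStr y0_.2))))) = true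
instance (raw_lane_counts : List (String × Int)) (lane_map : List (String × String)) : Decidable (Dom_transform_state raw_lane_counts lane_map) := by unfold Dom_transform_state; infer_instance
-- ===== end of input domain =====

-- B replaces A's single streaming Counter accumulation by a two-pass index-then-reduce
-- (collect movement order, then sum per movement); alternative decomposition, same results.

-- ===== PORT A =====
-- Counter loop: agg[m] += count for each (lane_id, count) whose lane maps to a movement.
def transform_state (raw_lane_counts : List (String × Int)) (lane_map : List (String × String)) : List (String × Int) :=
  (raw_lane_counts.foldl (fun (agg : PySem.Dict String Int) p =>
      match lane_map.lookup p.1 with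
      | some m => agg.insert m (agg.getD m 0 + p.2)
      | none => agg) PySem.Dict.empty).items

-- ===== PORT B =====
-- Pass 1: movements in first-occurrence order; pass 2: one sum per movement.
def transform_state_alt (raw_lane_counts : List (String × Int)) (lane_map : List (String × String)) : List (String × Int) :=
  let movements := raw_lane_counts.foldl (fun (acc : List String) p =>
      match lane_map.lookup p.1 with
      | some m => if m ∈ acc then acc else acc ++ [m]
      | none => acc) []
  movements.map (fun m =>
    (m, raw_lane_counts.foldl (fun (s : Int) p =>
          if lane_map.lookup p.1 = some m then s + p.2 else s) 0))

-- ===== PRECONDITION & SPEC =====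
def Spec_transform_state (raw_lane_counts : List (String × Int)) (lane_map : List (String × String)) (out : List (String × Int)) : Prop := out = transform_state_alt raw_lane_counts lane_map
instance (raw_lane_counts : List (String × Int)) (lane_map : List (String × String)) (out : List (String × Int)) : Decidable (Spec_transform_state raw_lane_counts lane_map out) := by unfold Spec_transform_state; infer_instance

-- ===== CLAIM (what is proved, stated in full; the proofs are below) =====
def Claim_equal_transform_state : Prop := ∀ (raw_lane_counts : List (String × Int)) (lane_map : List (String × String)), Dom_transform_state raw_lane_counts lane_map → Spec_transform_state raw_lane_counts lane_map (transform_state raw_lane_counts lane_map)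

-- ===== LEMMAS AND PROOFS =====

-- the stream of (movement, count) pairs that actually contribute
def pvProj (lane_map : List (String × String)) (raw : List (String × Int)) : List (String × Int) :=
  raw.filterMap (fun p => (lane_map.lookup p.1).map (fun m => (m, p.2)))

-- total contributed to movement v
def pvSum (l : List (String × Int)) (v : String) : Int :=
  ((l.filter (fun q => q.1 = v)).map (·.2)).sum

-- A's fold only acts on contributing entries
theorem pvFoldA_eq (lane_map : List (String × String)) :
    ∀ (raw : List (String × Int)) (d : PySem.Dict String Int),
      raw.foldl (fun agg p =>
        match lane_map.lookup p.1 with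
        | some m => agg.insert m (agg.getD m 0 + p.2)
        | none => agg) d
      = (pvProj lane_map raw).foldl (fun d q => d.insert q.1 (d.getD q.1 0 + q.2)) d := by
  intro raw
  induction raw with
  | nil => intro d; simp [pvProj]
  | cons p rest ih =>
    intro d
    simp only [List.foldl_cons, pvProj, List.filterMap_cons]
    cases h : lane_map.lookup p.1 with
    | none => simpa [pvProj] using ih d
    | some m => simpa [pvProj] using ih (d.insert m (d.getD m 0 + p.2))

theorem pvGetD_fold (l : List (String × Int)) :
    ∀ (d : PySem.Dict String Int) (v : String),
      (l.foldl (fun d q => d.insert q.1 (d.getD q.1 0 + q.2)) d).getD v 0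
      = d.getD v 0 + pvSum l v := by
  induction l with
  | nil => intro d v; simp [pvSum]
  | cons q rest ih =>
    intro d v
    simp only [List.foldl_cons]
    rw [ih]
    simp only [pvSum, List.filter_cons]
    by_cases hv : q.1 = v
    · simp [hv]
      ring
    · simp [PySem.Dict.getD_insert, hv, Ne.symm hv]

-- B's first pass is the Set-update of the contributing movement keys
theorem pvMov_eq (lane_map : List (String × String)) :
    ∀ (raw : List (String × Int)) (acc : List String),
      raw.foldl (fun (acc : List String) p =>
        match lane_map.lookup p.1 with
        | some m => if m ∈ acc then acc else acc ++ [m]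
        | none => acc) acc
      = PySem.Set.update acc ((pvProj lane_map raw).map (·.1)) := by
  intro raw
  induction raw with
  | nil => intro acc; simp [pvProj, PySem.Set.update_nil]
  | cons p rest ih =>
    intro acc
    simp only [List.foldl_cons, pvProj, List.filterMap_cons]
    cases h : lane_map.lookup p.1 with
    | none => simpa [pvProj] using ih acc
    | some m =>
      simp only [Option.map_some, List.map_cons, PySem.Set.update_cons]
      rw [← PySem.Set.add_eq_ite]
      simpa [pvProj] using ih (PySem.Set.add acc m)

-- B's second pass computes pvSum
theorem pvSumB_eq (lane_map : List (String × String)) (v : String) :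
    ∀ (raw : List (String × Int)) (a : Int),
      raw.foldl (fun (s : Int) p =>
        if lane_map.lookup p.1 = some v then s + p.2 else s) a
      = a + pvSum (pvProj lane_map raw) v := by
  intro raw
  induction raw with
  | nil => intro a; simp [pvProj, pvSum]
  | cons p rest ih =>
    intro a
    simp only [List.foldl_cons, pvProj, List.filterMap_cons]
    cases h : lane_map.lookup p.1 with
    | none => simpa [pvProj] using ih a
    | some m =>
      by_cases hv : m = v
      · subst hv
        simp only [Option.map_some, pvSum, List.filter_cons]
        rw [ih]
        simp [pvProj, pvSum]
        ring
      · have : ¬ (some m = some v) := by simpa using hv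
        simp only [if_neg this, Option.map_some, pvSum, List.filter_cons]
        rw [ih]
        simp [pvProj, pvSum, hv]

-- ===== VERDICT (by name: the statement is the Claim_ definition above) =====
theorem transform_state_spec : Claim_equal_transform_state := by
  intro raw lm _
  unfold Spec_transform_state transform_state transform_state_alt
  rw [pvFoldA_eq, pvMov_eq]
  have hnd : ((pvProj lm raw).foldl (fun d q => d.insert q.1 (d.getD q.1 0 + q.2))
      PySem.Dict.empty).keys.Nodup := by
    have := PySem.Dict.nodup_keys_foldl_insert_key (pvProj lm raw) Prod.fst
      (fun d q => d.getD q.1 0 + q.2) PySem.Dict.empty (by simp)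
    simpa using this
  rw [PySem.Dict.items_eq_map_keys _ hnd 0]
  have hkeys : ((pvProj lm raw).foldl (fun d q => d.insert q.1 (d.getD q.1 0 + q.2))
      PySem.Dict.empty).keys = PySem.Set.update (PySem.Dict.empty : PySem.Dict String Int).keys ((pvProj lm raw).map (·.1)) :=
    PySem.Dict.keys_foldl_insert_key (pvProj lm raw) Prod.fst _ _
  rw [hkeys]
  have hke : (PySem.Dict.empty : PySem.Dict String Int).keys = ([] : List String) := by
    simp [PySem.Dict.keys_empty]
  rw [hke]
  exact List.map_congr_left (fun m _ => by
    rw [pvGetD_fold, pvSumB_eq]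
    simp [PySem.Dict.getD_empty])
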